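-- pv_equiv track=rewrite | github.com/pooncs/cvm_transformer | src/utils/metrics.py | _get_alignments
-- ===== SOURCE A (Python) =====
-- from typing import List, Union, Optional
--
-- def _get_alignments(ref_words: List[str], hyp_words: List[str]) -> List[tuple]:
--     """Find word alignments between reference and hypothesis."""
--     alignments = []
--     ref_matched = set()
--     hyp_matched = set()
--
--     # Exact matches first
--     for i, ref_word in enumerate(ref_words):
--         if i in ref_matched:
--             continue
--         for j, hyp_word in enumerate(hyp_words):
--             if j in hyp_matched:
--                 continue
--             if ref_word == hyp_word:
--                 alignments.append((i, j))
--                 ref_matched.add(i)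
--                 hyp_matched.add(j)
--                 break
--
--     return alignments
-- ===== SOURCE B (Python) =====
-- from typing import List
--
--
-- def _get_alignments(ref_words: List[str], hyp_words: List[str]) -> List[tuple]:
--     """Find word alignments between reference and hypothesis."""
--     # Index hypothesis words once: word -> queue of its positions, in order.
--     queues = {}
--     for j, hyp_word in enumerate(hyp_words):
--         queues.setdefault(hyp_word, []).append(j)
--     alignments = []
--     for i, ref_word in enumerate(ref_words):
--         q = queues.get(ref_word)
--         if q:
--             alignments.append((i, q[0]))
--             queues[ref_word] = q[1:]
--     return alignments
-- ===== Notes on version B (the rewrite author's own statement) =====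
-- stated objective: faster
-- what changed: Instead of rescanning the whole hypothesis list for every reference word, B builds one dict from hypothesis word to the queue of its positions and pops the leftmost available position per reference word.
import Mathlib
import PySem

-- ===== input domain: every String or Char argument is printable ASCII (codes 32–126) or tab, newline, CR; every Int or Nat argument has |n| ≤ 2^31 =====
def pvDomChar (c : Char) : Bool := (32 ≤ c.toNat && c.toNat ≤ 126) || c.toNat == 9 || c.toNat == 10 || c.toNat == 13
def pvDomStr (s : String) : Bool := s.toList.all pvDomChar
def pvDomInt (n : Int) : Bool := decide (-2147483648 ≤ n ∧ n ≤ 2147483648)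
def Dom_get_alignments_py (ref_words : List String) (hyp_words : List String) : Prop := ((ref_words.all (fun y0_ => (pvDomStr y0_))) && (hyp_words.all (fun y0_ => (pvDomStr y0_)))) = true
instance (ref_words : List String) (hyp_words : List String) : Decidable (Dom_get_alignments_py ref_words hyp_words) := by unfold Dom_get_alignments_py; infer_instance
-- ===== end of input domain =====

-- B replaces A's per-reference-word rescan of the hypothesis list by one dict from
-- hypothesis word to the queue of its positions, popping the leftmost available one (faster).

-- ===== PORT A =====
-- inner 'for j, hyp_word in enumerate(hyp_words)' loop with break
def pvInnerA (rw : String) (hm : PySem.Set Int) : List (Int × String) → Option Int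
  | [] => none
  | (j, hw) :: rest =>
    if PySem.Set.contains hm j then pvInnerA rw hm rest
    else if hw == rw then some j
    else pvInnerA rw hm rest

-- outer 'for i, ref_word in enumerate(ref_words)' loop; state (alignments, ref_matched, hyp_matched)
def pvOuterA (hyp_words : List String) :
    List (Int × String) → List (Int × Int) → PySem.Set Int → PySem.Set Int → List (Int × Int)
  | [], al, _, _ => al
  | (i, rw) :: rest, al, rm, hm =>
    if PySem.Set.contains rm i then pvOuterA hyp_words rest al rm hm
    else
      match pvInnerA rw hm (PySem.List.enumerate hyp_words) with
      | some j => pvOuterA hyp_words rest (al ++ [(i, j)]) (PySem.Set.add rm i) (PySem.Set.add hm j)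
      | none => pvOuterA hyp_words rest al rm hm

def get_alignments_py (ref_words : List String) (hyp_words : List String) : List (Int × Int) :=
  pvOuterA hyp_words (PySem.List.enumerate ref_words) [] PySem.Set.empty PySem.Set.empty

-- ===== PORT B =====
-- 'queues.setdefault(hyp_word, []).append(j)' over enumerate(hyp_words)
def pvBuildB (hyp_words : List String) : PySem.Dict String (List Int) :=
  (PySem.List.enumerate hyp_words).foldl
    (fun d p => d.modify p.2 [] (· ++ [p.1])) PySem.Dict.empty

-- 'for i, ref_word in enumerate(ref_words): q = queues.get(ref_word); if q: append (i, q[0]); queues[ref_word] = q[1:]'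
def pvLoopB : List (Int × String) → PySem.Dict String (List Int) → List (Int × Int) → List (Int × Int)
  | [], _, al => al
  | (i, w) :: rest, d, al =>
    match d.get? w with
    | some (j :: q) => pvLoopB rest (d.insert w q) (al ++ [(i, j)])
    | _ => pvLoopB rest d al

def get_alignments_py_alt (ref_words : List String) (hyp_words : List String) : List (Int × Int) :=
  pvLoopB (PySem.List.enumerate ref_words) (pvBuildB hyp_words) []

-- ===== PRECONDITION & SPEC =====
def Spec_get_alignments_py (ref_words : List String) (hyp_words : List String) (out : List (Int × Int)) : Prop := out = get_alignments_py_alt ref_words hyp_words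
instance (ref_words : List String) (hyp_words : List String) (out : List (Int × Int)) : Decidable (Spec_get_alignments_py ref_words hyp_words out) := by unfold Spec_get_alignments_py; infer_instance

-- ===== CLAIM (what is proved, stated in full; the proofs are below) =====
def Claim_equal_get_alignments_py : Prop := ∀ (ref_words : List String) (hyp_words : List String), Dom_get_alignments_py ref_words hyp_words → Spec_get_alignments_py ref_words hyp_words (get_alignments_py ref_words hyp_words)

-- ===== LEMMAS AND PROOFS =====

-- the positions of w in hyp_words that are not yet matched, left to right
def pvAvail (hyp_words : List String) (w : String) (hm : PySem.Set Int) : List Int :=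
  ((PySem.List.enumerate hyp_words).filter
    (fun p => p.2 == w && !(PySem.Set.contains hm p.1))).map (·.1)

lemma pvInnerA_eq (rw : String) (hm : PySem.Set Int) (l : List (Int × String)) :
    pvInnerA rw hm l
      = ((l.filter (fun p => p.2 == rw && !(PySem.Set.contains hm p.1))).map (·.1)).head? := by
  induction l with
  | nil => rfl
  | cons a rest ih =>
    obtain ⟨j, hw⟩ := a
    by_cases hc : j ∈ hm
    · simp [pvInnerA, hc, ih]
    · by_cases he : hw = rw
      · simp [pvInnerA, hc, he]
      · simp [pvInnerA, hc, he, ih]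

lemma pv_contains_add_of_ne (s : PySem.Set Int) (x y : Int) (h : y ≠ x) :
    PySem.Set.contains (PySem.Set.add s x) y = PySem.Set.contains s y := by
  by_cases hy : y ∈ s
  · rw [(PySem.Set.contains_iff _ _).2 ((PySem.Set.mem_add _ _ _).2 (Or.inl hy)),
      (PySem.Set.contains_iff _ _).2 hy]
  · have h1 : PySem.Set.contains (PySem.Set.add s x) y = false := by
      by_contra hcon
      rcases (PySem.Set.mem_add _ _ _).1
          ((PySem.Set.contains_iff _ _).1 (Bool.of_not_eq_false hcon)) with h' | h'
      · exact hy h'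
      · exact h h'
    have h2 : PySem.Set.contains s y = false := by
      by_contra hcon
      exact hy ((PySem.Set.contains_iff _ _).1 (Bool.of_not_eq_false hcon))
    rw [h1, h2]

lemma pv_pairwise_fst_eq {l : List (Int × String)} (h : l.Pairwise (fun p q => p.1 < q.1))
    {p p' : Int × String} (hp : p ∈ l) (hp' : p' ∈ l) (he : p.1 = p'.1) : p = p' := by
  induction l with
  | nil => cases hp
  | cons a rest ih =>
    rcases List.pairwise_cons.1 h with ⟨ha, hr⟩
    rcases List.mem_cons.1 hp with rfl | hp2 <;> rcases List.mem_cons.1 hp' with rfl | hp2'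
    · rfl
    · exact absurd (ha _ hp2') (by omega)
    · exact absurd (ha _ hp2) (by omega)
    · exact ih hr hp2 hp2'

-- removing the popped index j from the queues: the same word's queue loses its head …
lemma pv_filter_exclude_self {l : List (Int × String)} (hpw : l.Pairwise (fun p q => p.1 < q.1))
    (c : Int × String → Bool) (hm : PySem.Set Int) {j : Int} {q : List Int}
    (h : (l.filter (fun p => c p && !(PySem.Set.contains hm p.1))).map (·.1) = j :: q) :
    (l.filter (fun p => c p && !(PySem.Set.contains (PySem.Set.add hm j) p.1))).map (·.1) = q := by
  induction l with
  | nil => simp at h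
  | cons a rest ih =>
    rcases List.pairwise_cons.1 hpw with ⟨ha, hr⟩
    by_cases hc : c a = true
    · by_cases hmem : a.1 ∈ hm
      · have ho : PySem.Set.contains hm a.1 = true := (PySem.Set.contains_iff _ _).2 hmem
        have hn : PySem.Set.contains (PySem.Set.add hm j) a.1 = true :=
          (PySem.Set.contains_iff _ _).2 ((PySem.Set.mem_add _ _ _).2 (Or.inl hmem))
        rw [List.filter_cons_of_neg (by simp; exact fun _ => hmem)] at h
        rw [List.filter_cons_of_neg (by simp; exact fun _ h' => absurd hmem h')]
        exact ih hr h
      · have ho : PySem.Set.contains hm a.1 = false := by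
          by_contra hcon
          exact hmem ((PySem.Set.contains_iff _ _).1 (Bool.of_not_eq_false hcon))
        rw [List.filter_cons_of_pos (by simp [hc]; exact hmem)] at h
        simp only [List.map_cons, List.cons.injEq] at h
        obtain ⟨haj, htail⟩ := h
        have hn : PySem.Set.contains (PySem.Set.add hm j) a.1 = true := by
          rw [haj]
          exact (PySem.Set.contains_iff _ _).2 ((PySem.Set.mem_add _ _ _).2 (Or.inr rfl))
        rw [List.filter_cons_of_neg (by simp; exact fun _ _ => haj)]
        rw [List.filter_congr (fun p hp => ?_)]
        · exact htail
        · have hne : p.1 ≠ j := by have := ha p hp; omega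
          rw [pv_contains_add_of_ne _ _ _ hne]
    · have hcf : c a = false := by simpa using hc
      rw [List.filter_cons_of_neg (by simp [hcf])] at h
      rw [List.filter_cons_of_neg (by simp [hcf])]
      exact ih hr h

-- … and every other word's queue is untouched
lemma pv_filter_exclude_other {l : List (Int × String)} (hpw : l.Pairwise (fun p q => p.1 < q.1))
    (w w' : String) (hm : PySem.Set Int) {j : Int} {q : List Int} (hne : w' ≠ w)
    (h : (l.filter (fun p => p.2 == w && !(PySem.Set.contains hm p.1))).map (·.1) = j :: q) :
    (l.filter (fun p => p.2 == w' && !(PySem.Set.contains (PySem.Set.add hm j) p.1))).map (·.1)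
      = (l.filter (fun p => p.2 == w' && !(PySem.Set.contains hm p.1))).map (·.1) := by
  -- the entry with index j has word w
  have hjmem : ∃ p0 ∈ l, p0.1 = j ∧ p0.2 = w := by
    have : j ∈ (l.filter (fun p => p.2 == w && !(PySem.Set.contains hm p.1))).map (·.1) := by
      rw [h]; exact List.mem_cons_self
    obtain ⟨p0, hp0, hp0j⟩ := List.mem_map.1 this
    obtain ⟨hp0l, hp0c⟩ := List.mem_filter.1 hp0
    simp only [Bool.and_eq_true, beq_iff_eq] at hp0c
    exact ⟨p0, hp0l, hp0j, hp0c.1⟩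
  obtain ⟨p0, hp0l, hp0j, hp0w⟩ := hjmem
  congr 1
  apply List.filter_congr
  intro p hp
  by_cases hpj : p.1 = j
  · have hpp0 : p = p0 := pv_pairwise_fst_eq hpw hp hp0l (by rw [hpj, hp0j])
    have hpw' : (p.2 == w') = false := by
      rw [hpp0, hp0w]
      exact beq_eq_false_iff_ne.2 (fun hc => hne hc.symm)
    simp [hpw']
  · rw [pv_contains_add_of_ne _ _ _ hpj]

lemma pv_avail_update (hyp : List String) (w : String) (hm : PySem.Set Int) {j : Int}
    {q : List Int} (h : pvAvail hyp w hm = j :: q) (w' : String) :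
    pvAvail hyp w' (PySem.Set.add hm j) = if w' = w then q else pvAvail hyp w' hm := by
  have hpw := PySem.List.pairwise_lt_enumerate hyp (0 : Int)
  by_cases hw : w' = w
  · subst hw
    rw [if_pos rfl]
    exact pv_filter_exclude_self hpw _ hm h
  · rw [if_neg hw]
    exact pv_filter_exclude_other hpw w w' hm hw h

lemma pv_build_getD (hyp : List String) (w : String) :
    (pvBuildB hyp).getD w [] = pvAvail hyp w PySem.Set.empty := by
  have h1 := PySem.Dict.getD_foldl_modify_append
    ((PySem.List.enumerate hyp).map (fun p : Int × String => (p.2, p.1))) PySem.Dict.empty w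
  rw [List.foldl_map] at h1
  unfold pvBuildB pvAvail
  rw [h1]
  simp [List.filter_map, Function.comp_def, PySem.Set.contains, PySem.Set.empty]

lemma pv_loop_eq (hyp : List String) :
    ∀ (refL : List (Int × String)) (al : List (Int × Int)) (rm hm : PySem.Set Int)
      (d : PySem.Dict String (List Int)),
      refL.Pairwise (fun p q => p.1 < q.1) →
      (∀ p ∈ refL, PySem.Set.contains rm p.1 = false) →
      (∀ w, d.getD w [] = pvAvail hyp w hm) →
      pvOuterA hyp refL al rm hm = pvLoopB refL d al := by
  intro refL
  induction refL with
  | nil => intro al rm hm d _ _ _; rfl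
  | cons a rest ih =>
    intro al rm hm d hpw hrm hinv
    obtain ⟨i, rw⟩ := a
    rcases List.pairwise_cons.1 hpw with ⟨ha, hr⟩
    have hrmi : PySem.Set.contains rm i = false := hrm (i, rw) List.mem_cons_self
    have hinner : pvInnerA rw hm (PySem.List.enumerate hyp) = (pvAvail hyp rw hm).head? := by
      rw [pvInnerA_eq]; rfl
    cases hav : pvAvail hyp rw hm with
    | nil =>
      -- no available position: both sides skip
      have hgd : d.getD rw [] = [] := by rw [hinv rw, hav]
      have hskip : pvLoopB ((i, rw) :: rest) d al = pvLoopB rest d al := by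
        cases hget : d.get? rw with
        | none => simp [pvLoopB, hget]
        | some v =>
          have hv : v = [] := by
            have := PySem.Dict.getD_eq_get?_getD d rw ([] : List Int)
            rw [hgd, hget] at this
            simpa using this.symm
          subst hv
          simp [pvLoopB, hget]
      rw [hskip]
      simp only [pvOuterA, hrmi, Bool.false_eq_true, if_false, hinner, hav, List.head?_nil]
      exact ih al rm hm d hr (fun p hp => hrm p (List.mem_cons_of_mem _ hp)) hinv
    | cons j q =>
      have hgd : d.getD rw [] = j :: q := by rw [hinv rw, hav]
      have hget : d.get? rw = some (j :: q) := by
        have hx := PySem.Dict.getD_eq_get?_getD d rw ([] : List Int)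
        rw [hgd] at hx
        cases hget : d.get? rw with
        | none => rw [hget] at hx; cases hx
        | some v => rw [hget] at hx; simp at hx; rw [hx]
      have hstepB : pvLoopB ((i, rw) :: rest) d al
          = pvLoopB rest (d.insert rw q) (al ++ [(i, j)]) := by
        simp [pvLoopB, hget]
      rw [hstepB]
      simp only [pvOuterA, hrmi, Bool.false_eq_true, if_false, hinner, hav, List.head?_cons]
      apply ih
      · exact hr
      · intro p hp
        have hne : p.1 ≠ i := by have := ha p hp; omega
        rw [pv_contains_add_of_ne _ _ _ hne]
        exact hrm p (List.mem_cons_of_mem _ hp)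
      · intro w
        rw [PySem.Dict.getD_insert, pv_avail_update hyp rw hm hav w]
        split <;> [rfl; exact hinv w]

-- ===== VERDICT (by name: the statement is the Claim_ definition above) =====
theorem get_alignments_py_spec : Claim_equal_get_alignments_py := by
  intro ref_words hyp_words _
  show get_alignments_py ref_words hyp_words = get_alignments_py_alt ref_words hyp_words
  unfold get_alignments_py get_alignments_py_alt
  apply pv_loop_eq
  · exact PySem.List.pairwise_lt_enumerate ref_words (0 : Int)
  · intro p _; rfl
  · exact pv_build_getD hyp_words
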